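-- pv_equiv track=rewrite | github.com/luminousphotonics/radiance_simuls | rect_layout.py | _generate_rect_uv
-- ===== SOURCE A (Python) =====
-- from typing import List, Dict, Tuple
--
-- def _generate_rect_uv(ring_n: int, offset: int) -> List[Tuple[int, int, int]]:
--     """
--     Generate (u, v, ring) for a rectangular layout with:
--       - ring 0: horizontal spine from u=-offset..+offset (step 2), v=0
--       - rings 1..ring_n: rectangular perimeters with u_max = offset + k, v_max = k
--     """
--     pts: List[Tuple[int, int, int]] = []
--
--     # Central horizontal spine: ring 0
--     for u in range(-offset, offset + 1, 2):
--         pts.append((u, 0, 0))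
--
--     # Rectangular rings: ring = k, k = 1..ring_n
--     for k in range(1, ring_n + 1):
--         u_max = offset + k
--         v_max = k
--         for u in range(-u_max, u_max + 1):
--             for v in range(-v_max, v_max + 1):
--                 if not (abs(u) == u_max or abs(v) == v_max):
--                     continue
--                 if (u + v) % 2 != 0:
--                     continue
--                 pts.append((u, v, k))
--
--     dedup = {}
--     for u, v, ring in pts:
--         key = (u, v)
--         if key not in dedup or ring < dedup[key]:
--             dedup[key] = ring
--
--     return [(u, v, ring) for (u, v), ring in dedup.items()]
-- ===== SOURCE B (Python) =====
-- from typing import List, Tuple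
--
-- def _generate_rect_uv(ring_n: int, offset: int) -> List[Tuple[int, int, int]]:
--     # Same spine, but each ring enumerates only its perimeter cells:
--     # full (parity-filtered) columns at u = +-u_max, and just the two
--     # endpoint cells v = +-v_max for every interior u.  No dedup pass is
--     # needed: the spine and the rings are pairwise disjoint.
--     pts: List[Tuple[int, int, int]] = []
--     for u in range(-offset, offset + 1, 2):
--         pts.append((u, 0, 0))
--     for k in range(1, ring_n + 1):
--         u_max = offset + k
--         v_max = k
--         for u in range(-u_max, u_max + 1):
--             if abs(u) == u_max:
--                 start = -v_max if (u + v_max) % 2 == 0 else -v_max + 1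
--                 for v in range(start, v_max + 1, 2):
--                     pts.append((u, v, k))
--             elif (u + v_max) % 2 == 0:
--                 pts.append((u, -v_max, k))
--                 pts.append((u, v_max, k))
--     return pts
-- ===== Notes on version B (the rewrite author's own statement) =====
-- stated objective: faster
-- what changed: B enumerates only the perimeter cells of each ring (full parity-stepped columns at u = ±u_max, just the two endpoint cells v = ±v_max for interior u) and drops the dedup dictionary pass entirely, which is provably an identity because the spine and the rings are pairwise disjoint; A scans the whole filled rectangle of every ring and then deduplicates.
import Mathlib
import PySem

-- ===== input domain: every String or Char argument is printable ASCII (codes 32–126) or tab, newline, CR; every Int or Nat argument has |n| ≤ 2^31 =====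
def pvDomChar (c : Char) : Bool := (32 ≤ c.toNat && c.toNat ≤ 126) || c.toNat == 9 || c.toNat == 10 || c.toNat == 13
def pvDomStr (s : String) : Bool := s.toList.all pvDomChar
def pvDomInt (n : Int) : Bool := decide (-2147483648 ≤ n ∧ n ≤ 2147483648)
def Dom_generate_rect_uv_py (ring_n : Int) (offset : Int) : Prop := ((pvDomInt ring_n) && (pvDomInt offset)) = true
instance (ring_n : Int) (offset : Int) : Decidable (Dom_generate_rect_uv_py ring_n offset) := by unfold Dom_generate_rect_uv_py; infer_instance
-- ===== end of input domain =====

-- B enumerates only the perimeter cells of each ring and omits A's dedup pass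
-- (proved to be an identity: spine and rings are pairwise disjoint); faster in a timing run.

-- ===== PORT A =====
def generate_rect_uv_py (ring_n : Int) (offset : Int) : List (Int × Int × Int) :=
  let pts : List (Int × Int × Int) := []
  let pts := (PySem.List.pyRange (-offset) (offset + 1) 2).foldl
      (fun pts u => pts ++ [(u, 0, 0)]) pts
  let pts := (PySem.List.pyRange 1 (ring_n + 1) 1).foldl (fun pts k =>
      let u_max := offset + k
      let v_max := k
      (PySem.List.pyRange (-u_max) (u_max + 1) 1).foldl (fun pts u =>
        (PySem.List.pyRange (-v_max) (v_max + 1) 1).foldl (fun pts v =>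
          if ¬(|u| = u_max ∨ |v| = v_max) then pts
          else if PySem.Int.mod (u + v) 2 ≠ 0 then pts
          else pts ++ [(u, v, k)]) pts) pts) pts
  -- `dedup[key]` is only evaluated when `key in dedup` (short-circuit `or`), so `getD` is exact
  let dedup := pts.foldl (fun d p =>
      let key := (p.1, p.2.1)
      if d.contains key = false ∨ p.2.2 < d.getD key 0 then d.insert key p.2.2 else d)
      (PySem.Dict.empty : PySem.Dict (Int × Int) Int)
  dedup.items.map (fun kv => (kv.1.1, kv.1.2, kv.2))

-- ===== PORT B =====
def generate_rect_uv_py_alt (ring_n : Int) (offset : Int) : List (Int × Int × Int) :=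
  let pts : List (Int × Int × Int) := []
  let pts := (PySem.List.pyRange (-offset) (offset + 1) 2).foldl
      (fun pts u => pts ++ [(u, 0, 0)]) pts
  (PySem.List.pyRange 1 (ring_n + 1) 1).foldl (fun pts k =>
      let u_max := offset + k
      let v_max := k
      (PySem.List.pyRange (-u_max) (u_max + 1) 1).foldl (fun pts u =>
        if |u| = u_max then
          let start := if PySem.Int.mod (u + v_max) 2 = 0 then -v_max else -v_max + 1
          (PySem.List.pyRange start (v_max + 1) 2).foldl (fun pts v => pts ++ [(u, v, k)]) pts
        else if PySem.Int.mod (u + v_max) 2 = 0 then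
          pts ++ [(u, -v_max, k)] ++ [(u, v_max, k)]
        else pts) pts) pts

-- ===== PRECONDITION & SPEC =====
def Spec_generate_rect_uv_py (ring_n : Int) (offset : Int) (out : List (Int × Int × Int)) : Prop := out = generate_rect_uv_py_alt ring_n offset
instance (ring_n : Int) (offset : Int) (out : List (Int × Int × Int)) : Decidable (Spec_generate_rect_uv_py ring_n offset out) := by unfold Spec_generate_rect_uv_py; infer_instance

-- ===== CLAIM (what is proved, stated in full; the proofs are below) =====
def Claim_equal_generate_rect_uv_py : Prop := ∀ (ring_n : Int) (offset : Int), Dom_generate_rect_uv_py ring_n offset → Spec_generate_rect_uv_py ring_n offset (generate_rect_uv_py ring_n offset)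

-- ===== LEMMAS AND PROOFS =====

-- Python's `%` with divisor 2 is Lean's `Int.emod`
theorem pvMod2 (a : Int) : PySem.Int.mod a 2 = a % 2 := by
  simp [PySem.Int.mod, Int.fmod_eq_emod]

-- ------- canonical forms of the two point lists -------

def pvSpine (offset : Int) : List (Int × Int × Int) :=
  (PySem.List.pyRange (-offset) (offset + 1) 2).map (fun u => (u, 0, 0))

def pvColA (offset k u : Int) : List (Int × Int × Int) :=
  ((PySem.List.pyRange (-k) (k + 1) 1).filter
    (fun v => decide ((|u| = offset + k ∨ |v| = k) ∧ (u + v) % 2 = 0))).map (fun v => (u, v, k))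

def pvColB (offset k u : Int) : List (Int × Int × Int) :=
  if |u| = offset + k then
    (PySem.List.pyRange (if (u + k) % 2 = 0 then -k else -k + 1) (k + 1) 2).map (fun v => (u, v, k))
  else if (u + k) % 2 = 0 then [(u, -k, k), (u, k, k)] else []

def pvRing (offset k : Int) : List (Int × Int × Int) :=
  (PySem.List.pyRange (-(offset + k)) (offset + k + 1) 1).flatMap (pvColB offset k)

def pvPts (ring_n offset : Int) : List (Int × Int × Int) :=
  pvSpine offset ++ (PySem.List.pyRange 1 (ring_n + 1) 1).flatMap (pvRing offset)

-- A's pts-building phase and dedup phase, verbatim (A = pvDedup ∘ pvPtsA by rfl)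
def pvPtsA (ring_n offset : Int) : List (Int × Int × Int) :=
  let pts : List (Int × Int × Int) := []
  let pts := (PySem.List.pyRange (-offset) (offset + 1) 2).foldl
      (fun pts u => pts ++ [(u, 0, 0)]) pts
  (PySem.List.pyRange 1 (ring_n + 1) 1).foldl (fun pts k =>
      let u_max := offset + k
      let v_max := k
      (PySem.List.pyRange (-u_max) (u_max + 1) 1).foldl (fun pts u =>
        (PySem.List.pyRange (-v_max) (v_max + 1) 1).foldl (fun pts v =>
          if ¬(|u| = u_max ∨ |v| = v_max) then pts
          else if PySem.Int.mod (u + v) 2 ≠ 0 then pts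
          else pts ++ [(u, v, k)]) pts) pts) pts

def pvDedup (pts : List (Int × Int × Int)) : List (Int × Int × Int) :=
  let dedup := pts.foldl (fun d p =>
      let key := (p.1, p.2.1)
      if d.contains key = false ∨ p.2.2 < d.getD key 0 then d.insert key p.2.2 else d)
      (PySem.Dict.empty : PySem.Dict (Int × Int) Int)
  dedup.items.map (fun kv => (kv.1.1, kv.1.2, kv.2))

theorem pvA_split (ring_n offset : Int) :
    generate_rect_uv_py ring_n offset = pvDedup (pvPtsA ring_n offset) := rfl

def pvKey (p : Int × Int × Int) : Int × Int := (p.1, p.2.1)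

-- ------- pyRange with step 2 -------

theorem pvRange2_nil {a b : Int} (h : b ≤ a) : PySem.List.pyRange a b 2 = [] := by
  rw [PySem.List.pyRange_of_pos a b (by norm_num)]
  rw [if_neg (by omega)]
  simp

theorem pvRange2_cons {a b : Int} (h : a < b) :
    PySem.List.pyRange a b 2 = a :: PySem.List.pyRange (a + 2) b 2 := by
  rw [PySem.List.pyRange_of_pos a b (by norm_num),
      PySem.List.pyRange_of_pos (a + 2) b (by norm_num)]
  rw [if_pos h]
  by_cases h' : a + 2 < b
  · rw [if_pos h']
    have hn : ((b - a + 2 - 1) / 2).toNat = ((b - (a + 2) + 2 - 1) / 2).toNat + 1 := by omega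
    rw [hn, List.range_succ_eq_map, List.map_cons, List.map_map]
    congr 1
    · norm_num
    · apply List.map_congr_left; intro x _; simp [Function.comp]; ring
  · rw [if_neg h']
    have hn : ((b - a + 2 - 1) / 2).toNat = 1 := by omega
    rw [hn]
    simp

theorem pvNodup_range2 (a b : Int) : (PySem.List.pyRange a b 2).Nodup := by
  rw [PySem.List.pyRange_of_pos a b (by norm_num)]
  exact (List.nodup_range).map (fun x y h => by omega)

theorem pvMem_range2 {a b x : Int} (h : x ∈ PySem.List.pyRange a b 2) : a ≤ x ∧ x < b := by
  have := (PySem.List.mem_pyRange_iff_of_pos (by norm_num) x).1 h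
  exact ⟨this.1, this.2.1⟩

-- ------- the parity filter is a step-2 range -------

theorem pvFilter_parity (c b : Int) : ∀ (a : Int),
    (PySem.List.pyRange a b 1).filter (fun v => decide ((c + v) % 2 = 0)) =
      PySem.List.pyRange (if (c + a) % 2 = 0 then a else a + 1) b 2 := by
  suffices H : ∀ (n : Nat) (a : Int), (b - a).toNat = n →
      (PySem.List.pyRange a b 1).filter (fun v => decide ((c + v) % 2 = 0)) =
      PySem.List.pyRange (if (c + a) % 2 = 0 then a else a + 1) b 2 by
    intro a; exact H _ a rfl
  intro n
  induction n with
  | zero =>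
    intro a ha
    have hba : b ≤ a := by omega
    rw [PySem.List.pyRange_one_eq_nil hba]
    split_ifs
    · rw [pvRange2_nil hba]; simp
    · rw [pvRange2_nil (by omega : b ≤ a + 1)]; simp
  | succ n ih =>
    intro a ha
    have hab : a < b := by omega
    rw [PySem.List.pyRange_one_cons hab, List.filter_cons]
    have ih' := ih (a + 1) (by omega)
    by_cases hp : (c + a) % 2 = 0
    · have hp' : ¬ (c + (a + 1)) % 2 = 0 := by omega
      rw [if_pos hp]
      simp only [hp, decide_true, if_pos]
      rw [ih', if_neg hp', pvRange2_cons hab]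
      have h2 : a + 1 + 1 = a + 2 := by ring
      rw [h2]
    · have hp' : (c + (a + 1)) % 2 = 0 := by omega
      rw [if_neg hp]
      simp only [hp, decide_false]
      simp only [Bool.false_eq_true, if_false]
      rw [ih', if_pos hp']

-- ------- the edge filter keeps exactly the two endpoints -------

theorem pvFilter_edge (u k : Int) (hk : 1 ≤ k) :
    (PySem.List.pyRange (-k) (k + 1) 1).filter (fun v => decide ((|v| = k) ∧ (u + v) % 2 = 0)) =
      if (u + k) % 2 = 0 then [-k, k] else [] := by
  have hs1 : PySem.List.pyRange (-k) (k + 1) 1 =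
      PySem.List.pyRange (-k) (-k + 1) 1 ++ PySem.List.pyRange (-k + 1) (k + 1) 1 :=
    PySem.List.pyRange_one_append _ _ _ (by omega) (by omega)
  have hs2 : PySem.List.pyRange (-k + 1) (k + 1) 1 =
      PySem.List.pyRange (-k + 1) k 1 ++ PySem.List.pyRange k (k + 1) 1 :=
    PySem.List.pyRange_one_append _ _ _ (by omega) (by omega)
  have hmid : (PySem.List.pyRange (-k + 1) k 1).filter
      (fun v => decide ((|v| = k) ∧ (u + v) % 2 = 0)) = [] := by
    apply List.filter_eq_nil_iff.2
    intro v hv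
    have := (PySem.List.mem_pyRange_one).1 hv
    simp only [decide_eq_true_eq, not_and]
    intro habs
    rcases abs_cases v with ⟨h1, h2⟩ | ⟨h1, h2⟩ <;> omega
  rw [hs1, hs2, PySem.List.pyRange_one_singleton]
  have hk1 : PySem.List.pyRange k (k + 1) 1 = [k] := PySem.List.pyRange_one_singleton k
  rw [hk1, List.filter_append, List.filter_append, hmid]
  have habs1 : |(-k)| = k := by rw [abs_neg]; exact abs_of_nonneg (by omega)
  have habs2 : |k| = k := abs_of_nonneg (by omega)
  have hd1 : (2 ∣ u + -k) ↔ (u + k) % 2 = 0 := by omega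
  have hd2 : (2 ∣ u + k) ↔ (u + k) % 2 = 0 := by omega
  by_cases hp : (u + k) % 2 = 0
  · rw [if_pos hp]
    simp [habs1, habs2, hd1, hd2, hp]
  · rw [if_neg hp]
    simp [habs1, habs2, hd1, hd2, hp]

theorem pvColA_eq_colB (offset k u : Int) (hk : 1 ≤ k) :
    pvColA offset k u = pvColB offset k u := by
  unfold pvColA pvColB
  by_cases hu : |u| = offset + k
  · rw [if_pos hu]
    have hfc : (PySem.List.pyRange (-k) (k + 1) 1).filter
        (fun v => decide ((|u| = offset + k ∨ |v| = k) ∧ (u + v) % 2 = 0)) =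
        (PySem.List.pyRange (-k) (k + 1) 1).filter (fun v => decide ((u + v) % 2 = 0)) := by
      apply List.filter_congr
      intro v _
      simp [hu]
    rw [hfc, pvFilter_parity]
    have hpar : (u + -k) % 2 = 0 ↔ (u + k) % 2 = 0 := by omega
    by_cases hp : (u + k) % 2 = 0
    · rw [if_pos (hpar.2 hp), if_pos hp]
    · rw [if_neg (fun h => hp (hpar.1 h)), if_neg hp]
  · rw [if_neg hu]
    have hfc : (PySem.List.pyRange (-k) (k + 1) 1).filter
        (fun v => decide ((|u| = offset + k ∨ |v| = k) ∧ (u + v) % 2 = 0)) =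
        (PySem.List.pyRange (-k) (k + 1) 1).filter (fun v => decide ((|v| = k) ∧ (u + v) % 2 = 0)) := by
      apply List.filter_congr
      intro v _
      simp [hu]
    rw [hfc, pvFilter_edge u k hk]
    by_cases hp : (u + k) % 2 = 0
    · rw [if_pos hp, if_pos hp]
      rfl
    · rw [if_neg hp, if_neg hp]
      rfl

-- ------- fold → flatMap conversions -------

theorem pvFoldl_append_ite {α β : Type} (p : α → Prop) [DecidablePred p] (f : α → β)
    (l : List α) : ∀ (acc : List β),
    l.foldl (fun acc x => if p x then acc ++ [f x] else acc) acc =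
      acc ++ (l.filter (fun x => decide (p x))).map f := by
  induction l with
  | nil => simp
  | cons x l ih =>
    intro acc
    by_cases hx : p x <;> simp [List.foldl_cons, hx, ih] 

theorem pvFlatMap_singleton {α β : Type} (f : α → β) (l : List α) :
    l.flatMap (fun x => [f x]) = l.map f := by
  induction l with
  | nil => rfl
  | cons x l ih => simp [ih]

theorem pvColFoldA (offset k u : Int) (hk : 1 ≤ k) (acc : List (Int × Int × Int)) :
    (PySem.List.pyRange (-k) (k + 1) 1).foldl (fun pts v =>
        if ¬(|u| = offset + k ∨ |v| = k) then pts
        else if PySem.Int.mod (u + v) 2 ≠ 0 then pts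
        else pts ++ [(u, v, k)]) acc = acc ++ pvColB offset k u := by
  have hbody : ∀ (pts : List (Int × Int × Int)) (v : Int), v ∈ PySem.List.pyRange (-k) (k + 1) 1 →
      (if ¬(|u| = offset + k ∨ |v| = k) then pts
       else if PySem.Int.mod (u + v) 2 ≠ 0 then pts
       else pts ++ [(u, v, k)]) =
      (if (|u| = offset + k ∨ |v| = k) ∧ (u + v) % 2 = 0 then pts ++ [(u, v, k)] else pts) := by
    intro pts v _
    rw [pvMod2]
    by_cases h1 : (|u| = offset + k ∨ |v| = k) <;> by_cases h2 : (u + v) % 2 = 0 <;>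
      simp [h1, h2]
  rw [PySem.List.foldl_congr_mem _ _
      (fun pts v => if (|u| = offset + k ∨ |v| = k) ∧ (u + v) % 2 = 0 then pts ++ [(u, v, k)] else pts)
      acc (fun pts v hv => hbody pts v hv)]
  rw [pvFoldl_append_ite (fun v => (|u| = offset + k ∨ |v| = k) ∧ (u + v) % 2 = 0)
      (fun v => (u, v, k))]
  rw [show ((PySem.List.pyRange (-k) (k + 1) 1).filter
        (fun v => decide ((|u| = offset + k ∨ |v| = k) ∧ (u + v) % 2 = 0))).map
        (fun v => (u, v, k)) = pvColA offset k u from rfl]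
  rw [pvColA_eq_colB offset k u hk]

theorem pvRingFoldA (offset k : Int) (hk : 1 ≤ k) (acc : List (Int × Int × Int)) :
    (PySem.List.pyRange (-(offset + k)) (offset + k + 1) 1).foldl (fun pts u =>
        (PySem.List.pyRange (-k) (k + 1) 1).foldl (fun pts v =>
          if ¬(|u| = offset + k ∨ |v| = k) then pts
          else if PySem.Int.mod (u + v) 2 ≠ 0 then pts
          else pts ++ [(u, v, k)]) pts) acc = acc ++ pvRing offset k := by
  rw [PySem.List.foldl_congr_mem _ _ (fun pts u => pts ++ pvColB offset k u) acc
      (fun pts u _ => pvColFoldA offset k u hk pts)]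
  rw [PySem.List.foldl_append_eq_flatMap]
  rfl

theorem pvPtsA_eq (ring_n offset : Int) : pvPtsA ring_n offset = pvPts ring_n offset := by
  simp only [pvPtsA, pvPts, pvSpine]
  rw [PySem.List.foldl_append_eq_flatMap (fun u => [((u : Int), (0 : Int), (0 : Int))])]
  rw [pvFlatMap_singleton (fun u => ((u : Int), (0 : Int), (0 : Int)))]
  rw [PySem.List.foldl_congr_mem _ _ (fun pts k => pts ++ pvRing offset k) _
      (fun pts k hk => pvRingFoldA offset k ((PySem.List.mem_pyRange_one.1 hk).1) pts)]
  rw [PySem.List.foldl_append_eq_flatMap]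
  simp

theorem pvColFoldB (offset k u : Int) (acc : List (Int × Int × Int)) :
    (if |u| = offset + k then
      (PySem.List.pyRange (if PySem.Int.mod (u + k) 2 = 0 then -k else -k + 1) (k + 1) 2).foldl
        (fun pts v => pts ++ [(u, v, k)]) acc
    else if PySem.Int.mod (u + k) 2 = 0 then
      acc ++ [(u, -k, k)] ++ [(u, k, k)]
    else acc) = acc ++ pvColB offset k u := by
  unfold pvColB
  rw [pvMod2]
  by_cases hu : |u| = offset + k
  · rw [if_pos hu, if_pos hu]
    rw [PySem.List.foldl_append_eq_flatMap (fun v => [((u : Int), (v : Int), (k : Int))])]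
    rw [pvFlatMap_singleton (fun v => ((u : Int), (v : Int), (k : Int)))]
  · rw [if_neg hu, if_neg hu]
    by_cases hp : (u + k) % 2 = 0 <;> simp [hp]

theorem pvAlt_eq (ring_n offset : Int) :
    generate_rect_uv_py_alt ring_n offset = pvPts ring_n offset := by
  simp only [generate_rect_uv_py_alt, pvPts, pvSpine]
  rw [PySem.List.foldl_append_eq_flatMap (fun u => [((u : Int), (0 : Int), (0 : Int))])]
  rw [pvFlatMap_singleton (fun u => ((u : Int), (0 : Int), (0 : Int)))]
  rw [PySem.List.foldl_congr_mem _ _ (fun pts k => pts ++ pvRing offset k) _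
      (fun pts k hk => by
        rw [PySem.List.foldl_congr_mem _ _ (fun pts u => pts ++ pvColB offset k u) pts
            (fun acc u _ => pvColFoldB offset k u acc)]
        rw [PySem.List.foldl_append_eq_flatMap]
        rfl)]
  rw [PySem.List.foldl_append_eq_flatMap]
  simp

-- ------- key nodup -------

theorem pvColB_key_mem {offset k u : Int} (hk : 1 ≤ k) {x : Int × Int}
    (hx : x ∈ (pvColB offset k u).map pvKey) :
    x.1 = u ∧ |x.2| ≤ k ∧ (|u| = offset + k ∨ |x.2| = k) := by
  have habsn : |(-k)| = k := by rw [abs_neg]; exact abs_of_nonneg (by omega)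
  have habsp : |k| = k := abs_of_nonneg (by omega)
  unfold pvColB at hx
  split_ifs at hx with hu hp
  · rw [List.map_map] at hx
    obtain ⟨v, hv, hveq⟩ := List.mem_map.1 hx
    have hb := pvMem_range2 hv
    subst hveq
    exact ⟨rfl, by show |v| ≤ k; rcases abs_cases v with ⟨h1,_⟩|⟨h1,_⟩ <;> omega, Or.inl hu⟩
  · rw [List.map_map] at hx
    obtain ⟨v, hv, hveq⟩ := List.mem_map.1 hx
    have hb := pvMem_range2 hv
    subst hveq
    exact ⟨rfl, by show |v| ≤ k; rcases abs_cases v with ⟨h1,_⟩|⟨h1,_⟩ <;> omega, Or.inl hu⟩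
  · simp only [List.map_cons, List.map_nil, List.mem_cons, List.not_mem_nil, or_false] at hx
    rcases hx with h | h <;> subst h
    · exact ⟨rfl, by simp only [pvKey]; omega, Or.inr (by simp only [pvKey]; exact habsn)⟩
    · exact ⟨rfl, by simp only [pvKey]; omega, Or.inr (by simp only [pvKey]; exact habsp)⟩
  · simp at hx

theorem pvColB_keys_nodup (offset k u : Int) (hk : 1 ≤ k) :
    ((pvColB offset k u).map pvKey).Nodup := by
  unfold pvColB
  split_ifs with hu hp
  · rw [List.map_map]
    have : (pvKey ∘ fun v => ((u : Int), (v : Int), (k : Int))) = fun v => (u, v) := rfl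
    rw [this]
    exact (pvNodup_range2 _ _).map (fun a b h => by injection h)
  · rw [List.map_map]
    have : (pvKey ∘ fun v => ((u : Int), (v : Int), (k : Int))) = fun v => (u, v) := rfl
    rw [this]
    exact (pvNodup_range2 _ _).map (fun a b h => by injection h)
  · have hne : ((u, -k) : Int × Int) ≠ (u, k) := by
      intro h; injection h with h1 h2; omega
    simp [pvKey, hne]
  · simp

theorem pvRing_key_m {offset k : Int} (hk : 1 ≤ k) {x : Int × Int}
    (hx : x ∈ (pvRing offset k).map pvKey) :
    max (|x.1| - offset) |x.2| = k := by
  unfold pvRing at hx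
  rw [List.map_flatMap] at hx
  obtain ⟨u, hu, hxu⟩ := List.mem_flatMap.1 hx
  have hub := PySem.List.mem_pyRange_one.1 hu
  obtain ⟨h1, h2, h3⟩ := pvColB_key_mem hk hxu
  subst h1
  rcases abs_cases x.1 with ⟨ha,_⟩|⟨ha,_⟩ <;> rcases abs_cases x.2 with ⟨hb,_⟩|⟨hb,_⟩ <;>
    rcases h3 with h | h <;> omega

theorem pvRing_keys_nodup (offset k : Int) (hk : 1 ≤ k) :
    ((pvRing offset k).map pvKey).Nodup := by
  unfold pvRing
  rw [List.map_flatMap]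
  refine List.nodup_flatMap.2 ⟨fun u _ => pvColB_keys_nodup offset k u hk, ?_⟩
  refine (PySem.List.pairwise_lt_pyRange_one _ _).imp ?_
  intro a b hab x hxa hxb
  have h1 := (pvColB_key_mem hk hxa).1
  have h2 := (pvColB_key_mem hk hxb).1
  omega

theorem pvNodup_keys (ring_n offset : Int) :
    ((pvPts ring_n offset).map pvKey).Nodup := by
  unfold pvPts pvSpine
  rw [List.map_append, List.map_flatMap, List.nodup_append]
  refine ⟨?_, ?_, ?_⟩
  · rw [List.map_map]
    have : (pvKey ∘ fun u => ((u : Int), (0 : Int), (0 : Int))) = fun u => (u, 0) := rfl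
    rw [this]
    exact (pvNodup_range2 _ _).map (fun a b h => by injection h)
  · refine List.nodup_flatMap.2 ⟨?_, ?_⟩
    · intro k hkmem
      exact pvRing_keys_nodup offset k (PySem.List.mem_pyRange_one.1 hkmem).1
    · refine (PySem.List.pairwise_lt_pyRange_one _ _).imp_of_mem ?_
      intro a b ha hb hab x hxa hxb
      have hka := (PySem.List.mem_pyRange_one.1 ha).1
      have hkb := (PySem.List.mem_pyRange_one.1 hb).1
      have h1 := pvRing_key_m hka hxa
      have h2 := pvRing_key_m hkb hxb
      omega
  · intro a ha b hb hab
    subst hab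
    rw [List.map_map] at ha
    obtain ⟨u, hu, haeq⟩ := List.mem_map.1 ha
    have hub := pvMem_range2 hu
    obtain ⟨k, hkmem, hbk⟩ := List.mem_flatMap.1 hb
    have hk := (PySem.List.mem_pyRange_one.1 hkmem).1
    have hm := pvRing_key_m hk hbk
    have haeq' : a = (u, 0) := haeq.symm
    subst haeq'
    simp only at hm
    rcases abs_cases u with ⟨h1,_⟩|⟨h1,_⟩ <;> simp [h1, abs_of_nonneg] at hm <;> omega

-- ------- dedup is the identity on a list with distinct keys -------

theorem pvFold_insert (pts : List (Int × Int × Int)) :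
    ∀ (d : PySem.Dict (Int × Int) Int),
    (∀ p ∈ pts, d.contains (pvKey p) = false) → (pts.map pvKey).Nodup →
    pts.foldl (fun d p =>
      let key := (p.1, p.2.1)
      if d.contains key = false ∨ p.2.2 < d.getD key 0 then d.insert key p.2.2 else d) d =
    pts.foldl (fun d p => d.insert (pvKey p) p.2.2) d := by
  induction pts with
  | nil => intro d _ _; rfl
  | cons p pts ih =>
    intro d hfresh hnd
    simp only [pvKey] at hfresh
    simp only [List.foldl_cons]
    have hp : d.contains (p.1, p.2.1) = false := hfresh p (List.mem_cons_self ..)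
    rw [if_pos (Or.inl hp)]
    have hnotin : pvKey p ∉ pts.map pvKey := (List.nodup_cons.1 hnd).1
    have ihx := ih (d.insert (p.1, p.2.1) p.2.2) (fun q hq => by
      rw [PySem.Dict.contains_insert]
      have hne : pvKey q ≠ pvKey p := fun he => hnotin (he ▸ List.mem_map_of_mem hq)
      simp only [pvKey] at hne
      simp [pvKey, hne, hfresh q (List.mem_cons_of_mem _ hq)]) (List.nodup_cons.1 hnd).2
    simp only [pvKey] at ihx
    exact ihx
theorem pvDedup_id (pts : List (Int × Int × Int)) (h : (pts.map pvKey).Nodup) :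
    pvDedup pts = pts := by
  unfold pvDedup
  rw [pvFold_insert pts PySem.Dict.empty (fun p _ => PySem.Dict.contains_empty _) h]
  have hitems := PySem.Dict.items_foldl_insert_fresh pts pvKey (fun p => p.2.2) PySem.Dict.empty
      (fun p _ => PySem.Dict.contains_empty _) h
  simp only [hitems]
  have hfid : ((fun kv : (Int × Int) × Int => (kv.1.1, kv.1.2, kv.2)) ∘
      fun a : Int × Int × Int => (pvKey a, a.2.2)) = id :=
    funext fun p => by rcases p with ⟨a, b, c⟩; rfl
  simp only [List.map_append, List.map_map]
  rw [hfid, List.map_id]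
  simp [PySem.Dict.empty]

-- ===== VERDICT (by name: the statement is the Claim_ definition above) =====
theorem generate_rect_uv_py_spec : Claim_equal_generate_rect_uv_py := by
  intro ring_n offset _
  unfold Spec_generate_rect_uv_py
  rw [pvA_split, pvPtsA_eq, pvDedup_id _ (pvNodup_keys ring_n offset), pvAlt_eq]
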